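-- pv_equiv track=rewrite | github.com/karthik-d/authenticated-todo-api-from-scratch | Task1-TodoAPI/todoapp/core/utils/auth.py | get_best_scope
-- ===== SOURCE A (Python) =====
-- ACCESS_SCOPE = {
-- 	'readonly' : 0,
-- 	'readwrite': 1,
-- 	'admin' : 	2
-- }
--
-- def validate_scope_name(scope):
-- 	return ACCESS_SCOPE.get(scope, None)
--
-- def get_best_scope(scopes):
-- 	best_scope = -1
-- 	for scope in scopes:
-- 		scope_id = validate_scope_name(scope)
-- 		if scope_id is None:
-- 			continue   # Ignore unknown scopes
-- 		if best_scope < scope_id: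
-- 			best_scope = scope_id
-- 	return best_scope
-- ===== SOURCE B (Python) =====
-- def get_best_scope(scopes):
--     present = set(scopes)
--     for name, sid in (("admin", 2), ("readwrite", 1), ("readonly", 0)):
--         if name in present:
--             return sid
--     return -1
-- ===== Notes on version B (the rewrite author's own statement) =====
-- stated objective: idiomatic
-- what changed: Instead of scanning every input element while maintaining a running maximum over dict lookups, B materializes the input into a set once and walks the fixed scope vocabulary in descending priority, returning the first id whose name is present (-1 if none).
import Mathlib
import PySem

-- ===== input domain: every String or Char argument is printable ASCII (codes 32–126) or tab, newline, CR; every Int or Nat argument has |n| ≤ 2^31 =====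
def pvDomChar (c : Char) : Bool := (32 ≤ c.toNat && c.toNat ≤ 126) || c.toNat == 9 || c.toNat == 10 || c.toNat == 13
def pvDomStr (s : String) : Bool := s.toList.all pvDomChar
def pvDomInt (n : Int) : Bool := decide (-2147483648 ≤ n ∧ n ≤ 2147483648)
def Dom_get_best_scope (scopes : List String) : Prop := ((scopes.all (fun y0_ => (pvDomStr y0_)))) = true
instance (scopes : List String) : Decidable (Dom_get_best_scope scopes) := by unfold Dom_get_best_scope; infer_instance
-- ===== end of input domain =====

-- B replaces A's per-element running-maximum scan with a one-pass set build plus a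
-- descending scan of the fixed scope vocabulary (idiomatic; same cost).


-- ===== PORT A =====
def ACCESS_SCOPE : PySem.Dict String Int :=
  ((PySem.Dict.empty.insert "readonly" (0 : Int)).insert "readwrite" 1).insert "admin" 2

def validate_scope_name (scope : String) : Option Int :=
  PySem.Dict.get? ACCESS_SCOPE scope

def get_best_scope (scopes : List String) : Int :=
  scopes.foldl (fun best_scope scope =>
    match validate_scope_name scope with
    | none => best_scope                 -- ignore unknown scopes
    | some scope_id => if best_scope < scope_id then scope_id else best_scope) (-1)

-- ===== PORT B =====
-- descending-priority scan of the fixed vocabulary; returns the first id present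
def altScan (present : PySem.Set String) : List (String × Int) → Int
  | [] => -1
  | (name, sid) :: rest =>
      if PySem.Set.contains present name then sid else altScan present rest

def get_best_scope_alt (scopes : List String) : Int :=
  altScan (PySem.Set.ofList scopes) [("admin", 2), ("readwrite", 1), ("readonly", 0)]

-- ===== PRECONDITION & SPEC =====
def Spec_get_best_scope (scopes : List String) (out : Int) : Prop := out = get_best_scope_alt scopes
instance (scopes : List String) (out : Int) : Decidable (Spec_get_best_scope scopes out) := by unfold Spec_get_best_scope; infer_instance

-- ===== CLAIM (what is proved, stated in full; the proofs are below) =====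
def Claim_equal_get_best_scope : Prop := ∀ (scopes : List String), Dom_get_best_scope scopes → Spec_get_best_scope scopes (get_best_scope scopes)

-- ===== LEMMAS AND PROOFS =====

-- B's value expressed directly by list membership
def bval (scopes : List String) : Int :=
  if "admin" ∈ scopes then 2
  else if "readwrite" ∈ scopes then 1
  else if "readonly" ∈ scopes then 0
  else -1

lemma bval_bounds (scopes : List String) : -1 ≤ bval scopes ∧ bval scopes ≤ 2 := by
  unfold bval; split_ifs <;> omega

lemma alt_eq_bval (scopes : List String) : get_best_scope_alt scopes = bval scopes := by
  simp only [get_best_scope_alt, altScan, bval, PySem.Set.contains_eq_listContains,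
    List.contains_iff_mem, PySem.Set.mem_ofList]

lemma validate_eq (s : String) : validate_scope_name s =
    (if s = "readonly" then some 0 else if s = "readwrite" then some 1
     else if s = "admin" then some 2 else none) := by
  by_cases h1 : s = "readonly" <;> by_cases h2 : s = "readwrite" <;> by_cases h3 : s = "admin" <;>
    simp_all [validate_scope_name, ACCESS_SCOPE, PySem.Dict.get?_insert_self,
      PySem.Dict.get?_insert_of_ne, PySem.Dict.get?_empty]

lemma bval_cons (s : String) (rest : List String) :
    bval (s :: rest) =
      max (if s = "admin" then 2 else if s = "readwrite" then 1
           else if s = "readonly" then 0 else -1) (bval rest) := by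
  unfold bval
  by_cases h1 : s = "admin" <;> by_cases h2 : s = "readwrite" <;> by_cases h3 : s = "readonly" <;>
    by_cases m1 : "admin" ∈ rest <;> by_cases m2 : "readwrite" ∈ rest <;>
    by_cases m3 : "readonly" ∈ rest <;> simp_all [List.mem_cons, eq_comm]

lemma foldl_eq_max_bval (scopes : List String) :
    ∀ best : Int, -1 ≤ best →
      scopes.foldl (fun best_scope scope =>
        match validate_scope_name scope with
        | none => best_scope
        | some scope_id => if best_scope < scope_id then scope_id else best_scope) best
      = max best (bval scopes) := by
  induction scopes with
  | nil =>
    intro best hb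
    simp [bval]; omega
  | cons s rest ih =>
    intro best hb
    rw [List.foldl_cons, bval_cons, validate_eq]
    by_cases h1 : s = "admin"
    · subst h1; simp only [reduceIte, String.reduceEq]
      by_cases hlt : best < 2
      · rw [if_pos hlt, ih 2 (by omega)]; omega
      · rw [if_neg hlt, ih best hb]; omega
    · by_cases h2 : s = "readwrite"
      · subst h2; simp only [reduceIte, String.reduceEq]
        by_cases hlt : best < 1
        · rw [if_pos hlt, ih 1 (by omega)]; omega
        · rw [if_neg hlt, ih best hb]; omega
      · by_cases h3 : s = "readonly"
        · subst h3; simp only [reduceIte, String.reduceEq]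
          by_cases hlt : best < 0
          · rw [if_pos hlt, ih 0 (by omega)]; omega
          · rw [if_neg hlt, ih best hb]; omega
        · simp only [h1, h2, h3, if_false]
          rw [ih best hb]; omega

-- ===== VERDICT (by name: the statement is the Claim_ definition above) =====
theorem get_best_scope_spec : Claim_equal_get_best_scope := by
  intro scopes _
  unfold Spec_get_best_scope get_best_scope
  rw [alt_eq_bval, foldl_eq_max_bval scopes (-1) (by omega)]
  have := bval_bounds scopes
  omega
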